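-- pv_equiv track=rewrite | github.com/liuzhonghe060718/Introduction-to-computation-B | 很多未分类的杂题3/水淹七军.py | dfs
-- ===== SOURCE A (Python) =====
-- direction = [(1, 0), (0, 1), (-1, 0), (0, -1)]
--
-- def dfs(matrix, x, y, tx, ty):
--     m, n = len(matrix), len(matrix[0])
--     h = matrix[x][y]
--     stack = [(x, y)]
--     visited = [[False for _ in range(n)] for _ in range(m)]
--
--     while stack:
--         x, y = stack.pop()
--         if x == tx and y == ty:
--             return True
--         visited[x][y] = True
--         for dx, dy in direction:
--             nx, ny = x + dx, y + dy
--             if 0 <= nx < m and 0 <= ny < n and not visited[nx][ny] and matrix[nx][ny] < h:  # 允许流向等高或更低的位置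
--                     stack.append((nx, ny))
--
--     return False
-- ===== SOURCE B (Python) =====
-- def dfs(matrix, x, y, tx, ty):
--     m, n = len(matrix), len(matrix[0])
--     h = matrix[x][y]
--     reach = {(x, y)}
--     frontier = [(x, y)]
--     while frontier:
--         nxt = []
--         for cx, cy in frontier:
--             for dx, dy in ((1, 0), (0, 1), (-1, 0), (0, -1)):
--                 nx, ny = cx + dx, cy + dy
--                 if 0 <= nx < m and 0 <= ny < n and (nx, ny) not in reach and matrix[nx][ny] < h:
--                     reach.add((nx, ny))
--                     nxt.append((nx, ny))
--         frontier = nxt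
--     return (tx, ty) in reach
-- ===== Notes on version B (the rewrite author's own statement) =====
-- stated objective: alternative
-- what changed: Replaces A's explicit-stack DFS (duplicate stack entries allowed, cells marked visited on pop, early return when the target is popped) by a frontier-by-frontier BFS flood fill that marks cells when first discovered, keeps no stack, and tests target membership once at the end.
-- outside the precondition, e.g. on dfs([[1, 0], [9]], 0, 0, 0, 1): A returns True, B raises IndexError; on dfs([[-1], [-2], [-3], [1, 1, 2, 3]], 3, -1, 3, 0): A returns False, B returns True
import Mathlib
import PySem

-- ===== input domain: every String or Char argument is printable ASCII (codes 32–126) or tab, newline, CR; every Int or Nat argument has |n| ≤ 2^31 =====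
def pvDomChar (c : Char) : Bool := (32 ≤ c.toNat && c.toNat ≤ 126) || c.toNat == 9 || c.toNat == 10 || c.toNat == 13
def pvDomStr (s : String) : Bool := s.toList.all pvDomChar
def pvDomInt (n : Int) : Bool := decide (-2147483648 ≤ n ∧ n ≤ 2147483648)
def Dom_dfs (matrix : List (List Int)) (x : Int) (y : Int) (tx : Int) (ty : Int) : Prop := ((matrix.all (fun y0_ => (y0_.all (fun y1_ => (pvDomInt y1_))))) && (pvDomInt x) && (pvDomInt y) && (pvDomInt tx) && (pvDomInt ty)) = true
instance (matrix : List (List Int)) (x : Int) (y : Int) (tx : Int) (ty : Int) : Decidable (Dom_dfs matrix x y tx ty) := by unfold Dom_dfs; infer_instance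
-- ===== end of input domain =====

-- B replaces A's explicit-stack DFS (mark on pop, early exit on the target) by a frontier-level
-- BFS flood fill (mark on first discovery, membership test at the end); objective: alternative
-- algorithm of the same cost, no speed claim.

-- ===== PORT A =====
-- matrix[i][j]; exact within Pre_dfs (every index the programs use there is in range)
def pvGetM (matrix : List (List Int)) (i j : Int) : Int :=
  PySem.List.pyGetD (PySem.List.pyGetD matrix i []) j 0

-- the module constant `direction`
def pvDirs : List (Int × Int) := [(1, 0), (0, 1), (-1, 0), (0, -1)]

-- ---- termination measure for A's while-loop (infrastructure the ports cite in decreasing_by) ----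
def pvCells (m n : Int) : List (Int × Int) :=
  (List.range m.toNat).flatMap (fun (i : Nat) => (List.range n.toNat).map (fun (j : Nat) => ((i : Int), (j : Int))))

def pvU (m n : Int) (vis : List (Int × Int)) : Nat :=
  ((pvCells m n).filter (fun c => !(PySem.Set.contains vis c))).length

def pvW (m n : Int) (vis : List (Int × Int)) (c : Int × Int) : Nat :=
  if (0 ≤ c.1 ∧ c.1 < m ∧ 0 ≤ c.2 ∧ c.2 < n) ∧ PySem.Set.contains vis c = false
  then 5 ^ pvU m n vis else 4 * 5 ^ pvU m n vis + 1

def pvPhi (m n : Int) (vis : List (Int × Int)) (st : List (Int × Int)) : Nat :=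
  (st.map (pvW m n vis)).sum

-- body of A's inner `for dx, dy in direction` loop
def pvPush (matrix : List (List Int)) (m n h : Int) (vis : List (Int × Int)) (c : Int × Int)
    (s : List (Int × Int)) (d : Int × Int) : List (Int × Int) :=
  if 0 ≤ c.1 + d.1 ∧ c.1 + d.1 < m ∧ 0 ≤ c.2 + d.2 ∧ c.2 + d.2 < n ∧
      PySem.Set.contains vis (c.1 + d.1, c.2 + d.2) = false ∧
      pvGetM matrix (c.1 + d.1) (c.2 + d.2) < h
  then (c.1 + d.1, c.2 + d.2) :: s else s

-- A's while-loop: stack with head = top (append+pop at the Python list's end = cons/uncons here);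
-- the boolean matrix `visited` is modeled as the set of cells marked True (exact within Pre_dfs:
-- every cell the loop marks there is in range, and marking is idempotent).  The fuel argument is
-- only a totality guard: pvPhi strictly decreases each iteration (pvPhi_dec below), so with the
-- starting fuel the 0-case is never reached.
def pvALoop (matrix : List (List Int)) (m n h tx ty : Int) :
    Nat → List (Int × Int) → List (Int × Int) → Bool
  | 0, _, _ => false
  | _ + 1, _, [] => false
  | fuel + 1, vis, c :: st =>
    if c.1 = tx ∧ c.2 = ty then true
    else
      pvALoop matrix m n h tx ty fuel (PySem.Set.add vis c)
        (pvDirs.foldl (pvPush matrix m n h (PySem.Set.add vis c) c) st)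

def dfs (matrix : List (List Int)) (x : Int) (y : Int) (tx : Int) (ty : Int) : Bool :=
  let m : Int := matrix.length
  let n : Int := (matrix.headD []).length
  let h : Int := pvGetM matrix x y
  pvALoop matrix m n h tx ty (pvPhi m n [] [(x, y)] + 1) [] [(x, y)]

-- ===== PORT B =====
-- body of B's inner `for dx, dy in …` loop: state = (reach, nxt)
def pvBPush (matrix : List (List Int)) (m n h : Int) (c : Int × Int)
    (acc : List (Int × Int) × List (Int × Int)) (d : Int × Int) :
    List (Int × Int) × List (Int × Int) :=
  if 0 ≤ c.1 + d.1 ∧ c.1 + d.1 < m ∧ 0 ≤ c.2 + d.2 ∧ c.2 + d.2 < n ∧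
      PySem.Set.contains acc.1 (c.1 + d.1, c.2 + d.2) = false ∧
      pvGetM matrix (c.1 + d.1) (c.2 + d.2) < h
  then (PySem.Set.add acc.1 (c.1 + d.1, c.2 + d.2), acc.2 ++ [(c.1 + d.1, c.2 + d.2)])
  else acc

-- one frontier cell of B's `for cx, cy in frontier` loop
def pvBStep (matrix : List (List Int)) (m n h : Int)
    (acc : List (Int × Int) × List (Int × Int)) (c : Int × Int) :
    List (Int × Int) × List (Int × Int) :=
  pvDirs.foldl (pvBPush matrix m n h c) acc

-- B's while-loop over frontiers.  The fuel is only a totality guard: the number of in-bounds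
-- undiscovered cells drops every non-final round (pvBLoop_dec below), so the 0-case is never hit.
def pvBLoop (matrix : List (List Int)) (m n h : Int) :
    Nat → List (Int × Int) → List (Int × Int) → List (Int × Int)
  | 0, reach, _ => reach
  | _ + 1, reach, [] => reach
  | fuel + 1, reach, c :: fr =>
    let p := (c :: fr).foldl (pvBStep matrix m n h) (reach, [])
    pvBLoop matrix m n h fuel p.1 p.2

def dfs_alt (matrix : List (List Int)) (x : Int) (y : Int) (tx : Int) (ty : Int) : Bool :=
  let m : Int := matrix.length
  let n : Int := (matrix.headD []).length
  let h : Int := pvGetM matrix x y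
  PySem.Set.contains
    (pvBLoop matrix m n h (2 * pvU m n (PySem.Set.ofList [(x, y)]) + 2)
      (PySem.Set.ofList [(x, y)]) [(x, y)]) (tx, ty)

-- ===== PRECONDITION & SPEC =====
-- Pre_ excludes the inputs on which A raises (empty matrix, start index beyond Python's
-- wraparound range, a short row read by a live scan) and the starts with y = -1 on a row longer
-- than row 0, where A's answer depends on Python's negative-index aliasing of the visited matrix.
def Pre_dfs (matrix : List (List Int)) (x : Int) (y : Int) (tx : Int) (ty : Int) : Prop :=
  matrix ≠ [] ∧
  -(matrix.length : Int) ≤ x ∧ x < (matrix.length : Int) ∧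
  (-- (i) every row at least as long as row 0, start column inside the visited range
   ((∀ row ∈ matrix, (matrix.headD []).length ≤ row.length) ∧
      -((matrix.headD []).length : Int) ≤ y ∧ y < ((matrix.headD []).length : Int) ∧
      (0 ≤ y ∨ y ≤ -2 ∨
        ((PySem.List.pyGetD matrix x []).length : Int) = ((matrix.headD []).length : Int)))
   ∨ -- (ii) the start is the target and its height is readable
   ((∀ row ∈ matrix, (matrix.headD []).length ≤ row.length) ∧ x = tx ∧ y = ty ∧
      -((PySem.List.pyGetD matrix x []).length : Int) ≤ y ∧
      y < ((PySem.List.pyGetD matrix x []).length : Int))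
   ∨ -- (iii) no neighbour of the start is scanned-in-range and strictly lower: no expansion
   (-((PySem.List.pyGetD matrix x []).length : Int) ≤ y ∧
      y < ((PySem.List.pyGetD matrix x []).length : Int) ∧
      -((matrix.headD []).length : Int) ≤ y ∧ y < ((matrix.headD []).length : Int) ∧
      ∀ d ∈ pvDirs,
        ¬(0 ≤ x + d.1 ∧ x + d.1 < (matrix.length : Int) ∧ 0 ≤ y + d.2 ∧
            y + d.2 < ((matrix.headD []).length : Int)) ∨
        (y + d.2 < ((PySem.List.pyGetD matrix (x + d.1) []).length : Int) ∧
          pvGetM matrix x y ≤ pvGetM matrix (x + d.1) (y + d.2))))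
instance (matrix : List (List Int)) (x : Int) (y : Int) (tx : Int) (ty : Int) : Decidable (Pre_dfs matrix x y tx ty) := by unfold Pre_dfs; infer_instance

def pvWitness_dfs : List (List Int) × Int × Int × Int × Int := ([[1, 0], [0, 0]], 0, 0, 1, 1)

def Spec_dfs (matrix : List (List Int)) (x : Int) (y : Int) (tx : Int) (ty : Int) (out : Bool) : Prop := out = dfs_alt matrix x y tx ty
instance (matrix : List (List Int)) (x : Int) (y : Int) (tx : Int) (ty : Int) (out : Bool) : Decidable (Spec_dfs matrix x y tx ty out) := by unfold Spec_dfs; infer_instance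

-- ===== CLAIM (what is proved, stated in full; the proofs are below) =====
def Claim_equal_dfs : Prop := ∀ (matrix : List (List Int)) (x : Int) (y : Int) (tx : Int) (ty : Int), Dom_dfs matrix x y tx ty → Pre_dfs matrix x y tx ty → Spec_dfs matrix x y tx ty (dfs matrix x y tx ty)

-- ===== LEMMAS AND PROOFS =====

theorem pvFilterLe {α : Type} (l : List α) (p q : α → Bool)
    (hpq : ∀ a, q a = true → p a = true) : (l.filter q).length ≤ (l.filter p).length := by
  induction l with
  | nil => simp
  | cons a l ih =>
    by_cases hqa : q a = true
    · rw [List.filter_cons_of_pos hqa, List.filter_cons_of_pos (hpq a hqa)]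
      simpa using ih
    · rw [List.filter_cons_of_neg (by simp_all)]
      by_cases hpa : p a = true
      · rw [List.filter_cons_of_pos hpa]
        exact le_trans ih (by simp)
      · rw [List.filter_cons_of_neg (by simp_all)]
        exact ih

theorem pvFilterLt {α : Type} (l : List α) (p q : α → Bool)
    (hpq : ∀ a, q a = true → p a = true) (c : α) (hc : c ∈ l) (hp : p c = true)
    (hq : q c = false) : (l.filter q).length < (l.filter p).length := by
  induction l with
  | nil => cases hc
  | cons a l ih =>
    rcases List.mem_cons.mp hc with rfl | hc'
    · rw [List.filter_cons_of_neg (by simp [hq]), List.filter_cons_of_pos hp]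
      simpa using Nat.lt_succ_of_le (pvFilterLe l p q hpq)
    · by_cases hqa : q a = true
      · rw [List.filter_cons_of_pos hqa, List.filter_cons_of_pos (hpq a hqa)]
        simpa using ih hc'
      · rw [List.filter_cons_of_neg (by simp_all)]
        by_cases hpa : p a = true
        · rw [List.filter_cons_of_pos hpa]
          exact Nat.lt_succ_of_le (le_of_lt (ih hc'))
        · rw [List.filter_cons_of_neg (by simp_all)]
          exact ih hc'

theorem pvContains_false_iff (s : List (Int × Int)) (a : Int × Int) :
    PySem.Set.contains s a = false ↔ a ∉ s := by
  constructor
  · intro hf hm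
    rw [(PySem.Set.contains_iff _ _).mpr hm] at hf
    cases hf
  · intro hnm
    cases hcc : PySem.Set.contains s a
    · rfl
    · exact absurd ((PySem.Set.contains_iff _ _).mp hcc) hnm

theorem pvMemCells (m n : Int) (c : Int × Int) :
    c ∈ pvCells m n ↔ 0 ≤ c.1 ∧ c.1 < m ∧ 0 ≤ c.2 ∧ c.2 < n := by
  obtain ⟨a, b⟩ := c
  show (a, b) ∈ pvCells m n ↔ 0 ≤ a ∧ a < m ∧ 0 ≤ b ∧ b < n
  constructor
  · intro hm
    obtain ⟨i, hi, hmem⟩ := List.mem_flatMap.mp hm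
    obtain ⟨j, hj, hpair⟩ := List.mem_map.mp hmem
    rw [List.mem_range] at hi hj
    cases hpair
    omega
  · intro hb
    refine List.mem_flatMap.mpr ⟨a.toNat, ?_, ?_⟩
    · rw [List.mem_range]; omega
    · refine List.mem_map.mpr ⟨b.toNat, ?_, ?_⟩
      · rw [List.mem_range]; omega
      · simp only [Prod.mk.injEq]; omega

theorem pvU_subset_le (m n : Int) (r1 r2 : List (Int × Int))
    (hs : ∀ e, e ∈ r1 → e ∈ r2) : pvU m n r2 ≤ pvU m n r1 := by
  apply pvFilterLe
  intro a ha
  rw [Bool.not_eq_true'] at ha ⊢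
  rw [pvContains_false_iff] at ha ⊢
  exact fun hm => ha (hs a hm)

theorem pvU_subset_lt (m n : Int) (r1 r2 : List (Int × Int))
    (hs : ∀ e, e ∈ r1 → e ∈ r2) (e : Int × Int) (he2 : e ∈ r2) (he1 : e ∉ r1)
    (hb : 0 ≤ e.1 ∧ e.1 < m ∧ 0 ≤ e.2 ∧ e.2 < n) : pvU m n r2 < pvU m n r1 := by
  refine pvFilterLt (pvCells m n) _ _ ?_ e ((pvMemCells m n e).mpr hb) ?_ ?_
  · intro a ha
    rw [Bool.not_eq_true'] at ha ⊢
    rw [pvContains_false_iff] at ha ⊢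
    exact fun hm => ha (hs a hm)
  · rw [Bool.not_eq_true', pvContains_false_iff]
    exact he1
  · rw [Bool.not_eq_false', PySem.Set.contains_iff]
    exact he2

theorem pvU_add_le (m n : Int) (vis : List (Int × Int)) (c : Int × Int) :
    pvU m n (PySem.Set.add vis c) ≤ pvU m n vis :=
  pvU_subset_le m n vis _ (fun e he => (PySem.Set.mem_add _ _ _).mpr (Or.inl he))

theorem pvU_add_lt (m n : Int) (vis : List (Int × Int)) (c : Int × Int)
    (hb : 0 ≤ c.1 ∧ c.1 < m ∧ 0 ≤ c.2 ∧ c.2 < n)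
    (hv : PySem.Set.contains vis c = false) :
    pvU m n (PySem.Set.add vis c) < pvU m n vis :=
  pvU_subset_lt m n vis _ (fun e he => (PySem.Set.mem_add _ _ _).mpr (Or.inl he)) c
    ((PySem.Set.mem_add _ _ _).mpr (Or.inr rfl)) ((pvContains_false_iff vis c).mp hv) hb

theorem pvW_mono (m n : Int) (vis : List (Int × Int)) (c e : Int × Int) :
    pvW m n (PySem.Set.add vis c) e ≤ pvW m n vis e := by
  have hU := pvU_add_le m n vis c
  have h1 : (1 : Nat) ≤ 5 ^ pvU m n (PySem.Set.add vis c) := Nat.one_le_pow _ _ (by norm_num)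
  unfold pvW
  by_cases he : (0 ≤ e.1 ∧ e.1 < m ∧ 0 ≤ e.2 ∧ e.2 < n) ∧
      PySem.Set.contains (PySem.Set.add vis c) e = false
  · rw [if_pos he]
    have hev : PySem.Set.contains vis e = false := by
      rw [pvContains_false_iff] at he ⊢
      exact fun hm => he.2 ((PySem.Set.mem_add _ _ _).mpr (Or.inl hm))
    rw [if_pos ⟨he.1, hev⟩]
    exact Nat.pow_le_pow_right (by norm_num) hU
  · rw [if_neg he]
    by_cases hw : (0 ≤ e.1 ∧ e.1 < m ∧ 0 ≤ e.2 ∧ e.2 < n) ∧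
        PySem.Set.contains vis e = false
    · rw [if_pos hw]
      have hcadd : PySem.Set.contains (PySem.Set.add vis c) e = true := by
        cases hcc : PySem.Set.contains (PySem.Set.add vis c) e
        · exact absurd ⟨hw.1, hcc⟩ he
        · rfl
      have hec : e = c := by
        rcases (PySem.Set.mem_add _ _ _).mp ((PySem.Set.contains_iff _ _).mp hcadd) with hm | hm
        · exact absurd hm ((pvContains_false_iff vis e).mp hw.2)
        · exact hm
      have hUlt : pvU m n (PySem.Set.add vis c) < pvU m n vis :=
        pvU_add_lt m n vis c (hec ▸ hw.1) (hec ▸ hw.2)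
      have h5 : 5 ^ (pvU m n (PySem.Set.add vis c) + 1) ≤ 5 ^ pvU m n vis :=
        Nat.pow_le_pow_right (by norm_num) hUlt
      rw [pow_succ] at h5
      omega
    · rw [if_neg hw]
      have := Nat.pow_le_pow_right (show 1 ≤ 5 by norm_num) hU
      omega

theorem pvPushSum_le (matrix : List (List Int)) (m n h : Int) (vis : List (Int × Int))
    (c : Int × Int) (ds : List (Int × Int)) (s0 : List (Int × Int)) :
    pvPhi m n vis (ds.foldl (pvPush matrix m n h vis c) s0) ≤
      pvPhi m n vis s0 + ds.length * 5 ^ pvU m n vis := by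
  induction ds generalizing s0 with
  | nil => simp
  | cons d ds ih =>
    rw [List.foldl_cons]
    refine le_trans (ih (pvPush matrix m n h vis c s0 d)) ?_
    have hstep : pvPhi m n vis (pvPush matrix m n h vis c s0 d) ≤
        pvPhi m n vis s0 + 5 ^ pvU m n vis := by
      unfold pvPush
      split_ifs with hC
      · simp only [pvPhi, List.map_cons, List.sum_cons]
        have hwv : pvW m n vis (c.1 + d.1, c.2 + d.2) = 5 ^ pvU m n vis := by
          unfold pvW
          rw [if_pos ⟨⟨hC.1, hC.2.1, hC.2.2.1, hC.2.2.2.1⟩, hC.2.2.2.2.1⟩]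
        omega
      · exact Nat.le_add_right _ _
    rw [List.length_cons, Nat.succ_mul]
    omega

theorem pvPhi_dec (matrix : List (List Int)) (m n h : Int) (vis : List (Int × Int))
    (c : Int × Int) (st : List (Int × Int)) :
    pvPhi m n (PySem.Set.add vis c)
        (pvDirs.foldl (pvPush matrix m n h (PySem.Set.add vis c) c) st) <
      pvPhi m n vis (c :: st) := by
  have hsum := pvPushSum_le matrix m n h (PySem.Set.add vis c) c pvDirs st
  have hmono : pvPhi m n (PySem.Set.add vis c) st ≤ pvPhi m n vis st :=
    List.sum_le_sum (fun e _ => pvW_mono m n vis c e)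
  have hlast : 4 * 5 ^ pvU m n (PySem.Set.add vis c) < pvW m n vis c := by
    unfold pvW
    split_ifs with hcb
    · have hUlt := pvU_add_lt m n vis c hcb.1 hcb.2
      have h5 : 5 ^ (pvU m n (PySem.Set.add vis c) + 1) ≤ 5 ^ pvU m n vis :=
        Nat.pow_le_pow_right (by norm_num) hUlt
      rw [pow_succ] at h5
      have h1 : (1 : Nat) ≤ 5 ^ pvU m n (PySem.Set.add vis c) := Nat.one_le_pow _ _ (by norm_num)
      omega
    · have := Nat.pow_le_pow_right (show 1 ≤ 5 by norm_num) (pvU_add_le m n vis c)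
      omega
  have hcons : pvPhi m n vis (c :: st) = pvW m n vis c + pvPhi m n vis st := by
    simp [pvPhi]
  rw [show pvDirs.length = 4 from rfl] at hsum
  omega


-- facts about the inner loop the port's termination cites: reach and nxt only grow, and every
-- cell put into nxt is a newly discovered in-bounds member of the final reach
theorem pvBFoldTerm (matrix : List (List Int)) (m n h : Int) (c : Int × Int)
    (ds : List (Int × Int)) (acc : List (Int × Int) × List (Int × Int)) :
    (∀ e, e ∈ acc.1 → e ∈ (ds.foldl (pvBPush matrix m n h c) acc).1) ∧
    (∀ e, e ∈ acc.2 → e ∈ (ds.foldl (pvBPush matrix m n h c) acc).2) ∧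
    (∀ e, e ∈ (ds.foldl (pvBPush matrix m n h c) acc).2 →
      e ∈ acc.2 ∨ (e ∈ (ds.foldl (pvBPush matrix m n h c) acc).1 ∧ e ∉ acc.1 ∧
        (0 ≤ e.1 ∧ e.1 < m ∧ 0 ≤ e.2 ∧ e.2 < n))) := by
  induction ds generalizing acc with
  | nil => exact ⟨fun e he => he, fun e he => he, fun e he => Or.inl he⟩
  | cons d ds ih =>
    rw [List.foldl_cons]
    obtain ⟨ih1, ih2, ih3⟩ := ih (pvBPush matrix m n h c acc d)
    have hstep1 : ∀ e, e ∈ acc.1 → e ∈ (pvBPush matrix m n h c acc d).1 := by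
      intro e he
      unfold pvBPush
      split_ifs
      · exact (PySem.Set.mem_add _ _ _).mpr (Or.inl he)
      · exact he
    refine ⟨fun e he => ih1 e (hstep1 e he), ?_, ?_⟩
    · intro e he
      refine ih2 e ?_
      unfold pvBPush
      split_ifs
      · exact List.mem_append_left _ he
      · exact he
    · intro e he
      rcases ih3 e he with he2 | ⟨hin, hnin, hb⟩
      · -- e entered during this pvBPush (or was already there)
        unfold pvBPush at he2
        split_ifs at he2 with hC
        · rcases List.mem_append.mp he2 with hold | hnew
          · exact Or.inl hold
          · have hev : e = (c.1 + d.1, c.2 + d.2) := List.mem_singleton.mp hnew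
            have hpb : pvBPush matrix m n h c acc d =
                (PySem.Set.add acc.1 (c.1 + d.1, c.2 + d.2),
                  acc.2 ++ [(c.1 + d.1, c.2 + d.2)]) := by
              unfold pvBPush; rw [if_pos hC]
            refine Or.inr ⟨ih1 e ?_, ?_, ?_⟩
            · rw [hpb, hev]
              show _ ∈ PySem.Set.add acc.1 (c.1 + d.1, c.2 + d.2)
              exact (PySem.Set.mem_add _ _ _).mpr (Or.inr rfl)
            · rw [hev]; exact (pvContains_false_iff _ _).mp hC.2.2.2.2.1
            · rw [hev]; exact ⟨hC.1, hC.2.1, hC.2.2.1, hC.2.2.2.1⟩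
        · exact Or.inl he2
      · refine Or.inr ⟨hin, fun hm => hnin (hstep1 e hm), hb⟩

theorem pvBStep_term (matrix : List (List Int)) (m n h : Int)
    (fr : List (Int × Int)) (acc : List (Int × Int) × List (Int × Int)) :
    (∀ e, e ∈ acc.1 → e ∈ (fr.foldl (pvBStep matrix m n h) acc).1) ∧
    (∀ e, e ∈ acc.2 → e ∈ (fr.foldl (pvBStep matrix m n h) acc).2) ∧
    (∀ e, e ∈ (fr.foldl (pvBStep matrix m n h) acc).2 →
      e ∈ acc.2 ∨ (e ∈ (fr.foldl (pvBStep matrix m n h) acc).1 ∧ e ∉ acc.1 ∧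
        (0 ≤ e.1 ∧ e.1 < m ∧ 0 ≤ e.2 ∧ e.2 < n))) := by
  induction fr generalizing acc with
  | nil => exact ⟨fun e he => he, fun e he => he, fun e he => Or.inl he⟩
  | cons c fr ih =>
    rw [List.foldl_cons]
    obtain ⟨ih1, ih2, ih3⟩ := ih (pvBStep matrix m n h acc c)
    obtain ⟨hc1, hc2, hc3⟩ := pvBFoldTerm matrix m n h c pvDirs acc
    refine ⟨fun e he => ih1 e (hc1 e he), fun e he => ih2 e (hc2 e he), ?_⟩
    intro e he
    rcases ih3 e he with he2 | ⟨hin, hnin, hb⟩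
    · rcases hc3 e he2 with hold | ⟨hin, hnin, hb⟩
      · exact Or.inl hold
      · exact Or.inr ⟨ih1 e hin, hnin, hb⟩
    · exact Or.inr ⟨hin, fun hm => hnin (hc1 e hm), hb⟩

theorem pvBLoop_dec (matrix : List (List Int)) (m n h : Int) (reach : List (Int × Int))
    (c : Int × Int) (fr : List (Int × Int)) :
    2 * pvU m n ((c :: fr).foldl (pvBStep matrix m n h) (reach, [])).1 +
        (if ((c :: fr).foldl (pvBStep matrix m n h) (reach, [])).2.isEmpty then 0 else 1) <
      2 * pvU m n reach + 1 := by
  obtain ⟨h1, _, h3⟩ := pvBStep_term matrix m n h (c :: fr) (reach, [])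
  cases hp : ((c :: fr).foldl (pvBStep matrix m n h) (reach, [])).2 with
  | nil =>
    have hle : pvU m n ((c :: fr).foldl (pvBStep matrix m n h) (reach, [])).1 ≤ pvU m n reach :=
      pvU_subset_le m n reach ((c :: fr).foldl (pvBStep matrix m n h) (reach, [])).1
        (fun e he => h1 e he)
    rw [if_pos (show ([] : List (Int × Int)).isEmpty = true from rfl)]
    omega
  | cons e rest =>
    have he : e ∈ ((c :: fr).foldl (pvBStep matrix m n h) (reach, [])).2 := by
      rw [hp]; exact List.mem_cons_self
    rcases h3 e he with habs | ⟨hin, hnin, hb⟩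
    · cases habs
    · have hlt : pvU m n ((c :: fr).foldl (pvBStep matrix m n h) (reach, [])).1 < pvU m n reach :=
        pvU_subset_lt m n reach ((c :: fr).foldl (pvBStep matrix m n h) (reach, [])).1
          (fun e' he' => h1 e' he') e hin hnin hb
      rw [if_neg (show ¬((e :: rest).isEmpty = true) from by simp)]
      omega


-- the cells a search step may move to, and the condition under which it may enter one
def pvNbrsL (a : Int × Int) : List (Int × Int) :=
  [(a.1 + 1, a.2), (a.1, a.2 + 1), (a.1 - 1, a.2), (a.1, a.2 - 1)]

def pvOK (matrix : List (List Int)) (m n h : Int) (d : Int × Int) : Prop :=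
  (0 ≤ d.1 ∧ d.1 < m ∧ 0 ≤ d.2 ∧ d.2 < n) ∧ pvGetM matrix d.1 d.2 < h

-- reachability from a cell through enterable, unvisited cells (the common spec of both searches)
inductive pvRA (matrix : List (List Int)) (m n h : Int) (vis : List (Int × Int)) :
    (Int × Int) → (Int × Int) → Prop where
  | refl (a : Int × Int) : pvRA matrix m n h vis a a
  | step (a d t : Int × Int) : d ∈ pvNbrsL a → pvOK matrix m n h d →
      PySem.Set.contains vis d = false → pvRA matrix m n h vis d t → pvRA matrix m n h vis a t

def pvSR (matrix : List (List Int)) (m n h : Int) (vis : List (Int × Int))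
    (st : List (Int × Int)) (t : Int × Int) : Prop :=
  ∃ e ∈ st, pvRA matrix m n h vis e t

theorem pvRA_mono (matrix : List (List Int)) (m n h : Int) (vis : List (Int × Int))
    (c a t : Int × Int) (hra : pvRA matrix m n h (PySem.Set.add vis c) a t) :
    pvRA matrix m n h vis a t := by
  induction hra with
  | refl a => exact .refl a
  | step a d t hd hok hnv _ ih =>
    refine .step a d t hd hok ?_ ih
    rw [pvContains_false_iff] at hnv ⊢
    exact fun hm => hnv ((PySem.Set.mem_add _ _ _).mpr (Or.inl hm))

-- marking c: any reach fact either ends at c, survives the marking, or is rerouted through an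
-- enterable, after-the-marking-unvisited neighbour of c
theorem pvRA_mark (matrix : List (List Int)) (m n h : Int) (vis : List (Int × Int))
    (c a t : Int × Int) (hra : pvRA matrix m n h vis a t) :
    t = c ∨ pvRA matrix m n h (PySem.Set.add vis c) a t ∨
      ∃ d, d ∈ pvNbrsL c ∧ pvOK matrix m n h d ∧
        PySem.Set.contains (PySem.Set.add vis c) d = false ∧
        pvRA matrix m n h (PySem.Set.add vis c) d t := by
  induction hra with
  | refl a => exact Or.inr (Or.inl (.refl a))
  | step a d t hd hok hnv _ ih =>
    rcases ih with htc | hra' | hex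
    · exact Or.inl htc
    · by_cases hdc : d = c
      · subst hdc
        cases hra' with
        | refl => exact Or.inl rfl
        | step _ d' _ hd' hok' hnv' hra'' => exact Or.inr (Or.inr ⟨d', hd', hok', hnv', hra''⟩)
      · refine Or.inr (Or.inl (.step a d t hd hok ?_ hra'))
        rw [pvContains_false_iff] at hnv ⊢
        intro hm
        rcases (PySem.Set.mem_add _ _ _).mp hm with hm' | hm'
        · exact hnv hm'
        · exact hdc hm'
    · exact Or.inr (Or.inr hex)

theorem pvMemFoldlPush (matrix : List (List Int)) (m n h : Int) (vis : List (Int × Int))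
    (c : Int × Int) (ds : List (Int × Int)) (s0 : List (Int × Int)) (e : Int × Int) :
    e ∈ ds.foldl (pvPush matrix m n h vis c) s0 ↔
      e ∈ s0 ∨ ∃ d ∈ ds, e = (c.1 + d.1, c.2 + d.2) ∧ pvOK matrix m n h e ∧
        PySem.Set.contains vis e = false := by
  induction ds generalizing s0 with
  | nil => simp
  | cons d ds ih =>
    rw [List.foldl_cons, ih]
    unfold pvPush
    split_ifs with hC
    · constructor
      · rintro (hm | ⟨d', hd', hP⟩)
        · rcases List.mem_cons.mp hm with rfl | hs
          · exact Or.inr ⟨d, List.mem_cons_self, rfl,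
              ⟨⟨hC.1, hC.2.1, hC.2.2.1, hC.2.2.2.1⟩, hC.2.2.2.2.2⟩, hC.2.2.2.2.1⟩
          · exact Or.inl hs
        · exact Or.inr ⟨d', List.mem_cons_of_mem d hd', hP⟩
      · rintro (hs | ⟨d', hd', hP⟩)
        · exact Or.inl (List.mem_cons_of_mem _ hs)
        · rcases List.mem_cons.mp hd' with rfl | hd''
          · exact Or.inl (by rw [hP.1]; exact List.mem_cons_self)
          · exact Or.inr ⟨d', hd'', hP⟩
    · constructor
      · rintro (hs | ⟨d', hd', hP⟩)
        · exact Or.inl hs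
        · exact Or.inr ⟨d', List.mem_cons_of_mem d hd', hP⟩
      · rintro (hs | ⟨d', hd', hP⟩)
        · exact Or.inl hs
        · rcases List.mem_cons.mp hd' with rfl | hd''
          · exfalso
            obtain ⟨hev, hok, hcv⟩ := hP
            rw [hev] at hok hcv
            exact hC ⟨hok.1.1, hok.1.2.1, hok.1.2.2.1, hok.1.2.2.2, hcv, hok.2⟩
          · exact Or.inr ⟨d', hd'', hP⟩

theorem pvMemSt' (matrix : List (List Int)) (m n h : Int) (vis : List (Int × Int))
    (c : Int × Int) (st : List (Int × Int)) (e : Int × Int) :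
    e ∈ pvDirs.foldl (pvPush matrix m n h vis c) st ↔
      e ∈ st ∨ (e ∈ pvNbrsL c ∧ pvOK matrix m n h e ∧ PySem.Set.contains vis e = false) := by
  rw [pvMemFoldlPush]
  refine or_congr_right ?_
  constructor
  · rintro ⟨d, hd, hev, hok, hcv⟩
    refine ⟨?_, hok, hcv⟩
    simp only [pvDirs, List.mem_cons, List.not_mem_nil, or_false] at hd
    rcases hd with rfl | rfl | rfl | rfl <;> subst hev <;>
      simp [pvNbrsL, Prod.ext_iff] <;> omega
  · rintro ⟨hnb, hok, hcv⟩
    simp only [pvNbrsL, List.mem_cons, List.not_mem_nil, or_false] at hnb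
    rcases hnb with rfl | rfl | rfl | rfl
    · exact ⟨(1, 0), by simp [pvDirs], by simp, hok, hcv⟩
    · exact ⟨(0, 1), by simp [pvDirs], by simp, hok, hcv⟩
    · exact ⟨(-1, 0), by simp [pvDirs], by simp [Prod.ext_iff]; omega, hok, hcv⟩
    · exact ⟨(0, -1), by simp [pvDirs], by simp [Prod.ext_iff]; omega, hok, hcv⟩

theorem pvSR_step (matrix : List (List Int)) (m n h : Int) (vis : List (Int × Int))
    (c t : Int × Int) (st st' : List (Int × Int))
    (hmem : ∀ e, e ∈ st' ↔ e ∈ st ∨ (e ∈ pvNbrsL c ∧ pvOK matrix m n h e ∧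
      PySem.Set.contains (PySem.Set.add vis c) e = false))
    (hct : c ≠ t) :
    pvSR matrix m n h vis (c :: st) t ↔ pvSR matrix m n h (PySem.Set.add vis c) st' t := by
  constructor
  · rintro ⟨e, he, hra⟩
    rcases pvRA_mark matrix m n h vis c e t hra with htc | hra' | ⟨d, hd, hok, hnv, hra'⟩
    · exact absurd htc.symm hct
    · rcases List.mem_cons.mp he with rfl | he'
      · -- the popped cell itself: unfold its (marked) reach fact once
        cases hra' with
        | refl => exact absurd rfl hct
        | step _ d' _ hd' hok' hnv' hra'' =>
          exact ⟨d', (hmem d').mpr (Or.inr ⟨hd', hok', hnv'⟩), hra''⟩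
      · exact ⟨e, (hmem e).mpr (Or.inl he'), hra'⟩
    · exact ⟨d, (hmem d).mpr (Or.inr ⟨hd, hok, hnv⟩), hra'⟩
  · rintro ⟨e, he, hra⟩
    have hra0 := pvRA_mono matrix m n h vis c e t hra
    rcases (hmem e).mp he with he' | ⟨hnb, hok, hnv⟩
    · exact ⟨e, List.mem_cons_of_mem c he', hra0⟩
    · refine ⟨c, List.mem_cons_self, .step c e t hnb hok ?_ hra0⟩
      rw [pvContains_false_iff] at hnv ⊢
      exact fun hm => hnv ((PySem.Set.mem_add _ _ _).mpr (Or.inl hm))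

theorem pvALoop_iff (matrix : List (List Int)) (m n h tx ty : Int) (fuel : Nat)
    (vis st : List (Int × Int)) (hf : pvPhi m n vis st < fuel) :
    pvALoop matrix m n h tx ty fuel vis st = true ↔ pvSR matrix m n h vis st (tx, ty) := by
  induction fuel generalizing vis st with
  | zero => exact absurd hf (Nat.not_lt_zero _)
  | succ f ih =>
    match st with
    | [] => simp [pvALoop, pvSR]
    | c :: st =>
      by_cases hc : c.1 = tx ∧ c.2 = ty
      · rw [show pvALoop matrix m n h tx ty (f + 1) vis (c :: st) = true from by
          simp [pvALoop, if_pos hc]]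
        simp only [true_iff]
        have hceq : c = (tx, ty) := Prod.ext_iff.mpr ⟨hc.1, hc.2⟩
        exact ⟨c, List.mem_cons_self, by rw [← hceq]; exact .refl c⟩
      · have hdec := pvPhi_dec matrix m n h vis c st
        have hf' : pvPhi m n (PySem.Set.add vis c)
            (pvDirs.foldl (pvPush matrix m n h (PySem.Set.add vis c) c) st) < f := by
          omega
        rw [show pvALoop matrix m n h tx ty (f + 1) vis (c :: st) =
            pvALoop matrix m n h tx ty f (PySem.Set.add vis c)
              (pvDirs.foldl (pvPush matrix m n h (PySem.Set.add vis c) c) st) from by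
          simp [pvALoop, if_neg hc]]
        rw [ih _ _ hf']
        exact (pvSR_step matrix m n h vis c (tx, ty) st _
          (fun e => pvMemSt' matrix m n h (PySem.Set.add vis c) c st e)
          (fun he => hc (by rw [he]; exact ⟨rfl, rfl⟩))).symm

-- ---- B's side ----
theorem pvRA_snoc (matrix : List (List Int)) (m n h : Int) (vis : List (Int × Int))
    (a b d : Int × Int) (hab : pvRA matrix m n h vis a b) (hd : d ∈ pvNbrsL b)
    (hok : pvOK matrix m n h d) (hnv : PySem.Set.contains vis d = false) :
    pvRA matrix m n h vis a d := by
  induction hab with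
  | refl a => exact .step a d d hd hok hnv (.refl d)
  | step a e t' hne hoke hnve _ ih => exact .step a e d hne hoke hnve (ih hd)

theorem pvRA_closed (matrix : List (List Int)) (m n h : Int) (R : List (Int × Int))
    (hcl : ∀ c ∈ R, ∀ d ∈ pvNbrsL c, pvOK matrix m n h d → d ∈ R)
    (a t : Int × Int) (hra : pvRA matrix m n h [] a t) (ha : a ∈ R) : t ∈ R := by
  induction hra with
  | refl a => exact ha
  | step a d t hd hok _ _ ih => exact ih (hcl a ha d hd hok)

-- spec-level invariant of B's inner loop over the four directions
theorem pvBFoldInv (matrix : List (List Int)) (m n h : Int) (c : Int × Int)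
    (ds : List (Int × Int))
    (hmap : ∀ d ∈ ds, (c.1 + d.1, c.2 + d.2) ∈ pvNbrsL c)
    (hok4 : ∀ d ∈ ds, (0 ≤ c.1 + d.1 ∧ c.1 + d.1 < m ∧ 0 ≤ c.2 + d.2 ∧ c.2 + d.2 < n) →
      pvGetM matrix (c.1 + d.1) (c.2 + d.2) < h → pvOK matrix m n h (c.1 + d.1, c.2 + d.2))
    (acc : List (Int × Int) × List (Int × Int)) :
    (∀ e, e ∈ (ds.foldl (pvBPush matrix m n h c) acc).1 →
      e ∈ acc.1 ∨ (e ∈ (ds.foldl (pvBPush matrix m n h c) acc).2 ∧ pvOK matrix m n h e ∧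
        e ∈ pvNbrsL c)) ∧
    (∀ d ∈ ds, pvOK matrix m n h (c.1 + d.1, c.2 + d.2) →
      (c.1 + d.1, c.2 + d.2) ∈ (ds.foldl (pvBPush matrix m n h c) acc).1) := by
  induction ds generalizing acc with
  | nil => exact ⟨fun e he => Or.inl he, fun d hd => absurd hd (List.not_mem_nil)⟩
  | cons d ds ih =>
    rw [List.foldl_cons]
    obtain ⟨ih1, ih2⟩ := ih (fun d' hd' => hmap d' (List.mem_cons_of_mem d hd'))
      (fun d' hd' => hok4 d' (List.mem_cons_of_mem d hd')) (pvBPush matrix m n h c acc d)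
    obtain ⟨ht1, ht2, _⟩ := pvBFoldTerm matrix m n h c ds (pvBPush matrix m n h c acc d)
    refine ⟨?_, ?_⟩
    · intro e he
      rcases ih1 e he with he1 | hnew
      · unfold pvBPush at he1
        split_ifs at he1 with hC
        · rcases (PySem.Set.mem_add _ _ _).mp he1 with hold | hev
          · exact Or.inl hold
          · refine Or.inr ⟨ht2 e ?_, ?_, ?_⟩
            · unfold pvBPush
              rw [if_pos hC]
              rw [hev]
              exact List.mem_append_right _ (List.mem_singleton_self _)
            · rw [hev]
              exact hok4 d List.mem_cons_self ⟨hC.1, hC.2.1, hC.2.2.1, hC.2.2.2.1⟩ hC.2.2.2.2.2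
            · rw [hev]
              exact hmap d List.mem_cons_self
        · exact Or.inl he1
      · exact Or.inr hnew
    · intro d' hd' hokd'
      rcases List.mem_cons.mp hd' with rfl | hd''
      · refine ht1 _ ?_
        unfold pvBPush
        split_ifs with hC
        · exact (PySem.Set.mem_add _ _ _).mpr (Or.inr rfl)
        · -- not pushed: it must already be in reach
          cases hcc : PySem.Set.contains acc.1 (c.1 + d'.1, c.2 + d'.2) with
          | false => exact absurd ⟨hokd'.1.1, hokd'.1.2.1, hokd'.1.2.2.1, hokd'.1.2.2.2, hcc, hokd'.2⟩ hC
          | true => exact (PySem.Set.contains_iff _ _).mp hcc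
      · exact ih2 d' hd'' hokd'

theorem pvBCell_inv (matrix : List (List Int)) (m n h : Int) (c : Int × Int)
    (acc : List (Int × Int) × List (Int × Int)) :
    (∀ e, e ∈ (pvBStep matrix m n h acc c).1 →
      e ∈ acc.1 ∨ (e ∈ (pvBStep matrix m n h acc c).2 ∧ pvOK matrix m n h e ∧
        e ∈ pvNbrsL c)) ∧
    (∀ d ∈ pvNbrsL c, pvOK matrix m n h d → d ∈ (pvBStep matrix m n h acc c).1) := by
  have hmap : ∀ d ∈ pvDirs, (c.1 + d.1, c.2 + d.2) ∈ pvNbrsL c := by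
    intro d hd
    simp only [pvDirs, List.mem_cons, List.not_mem_nil, or_false] at hd
    rcases hd with rfl | rfl | rfl | rfl <;> simp [pvNbrsL, Prod.ext_iff] <;> omega
  have hok4 : ∀ d ∈ pvDirs, (0 ≤ c.1 + d.1 ∧ c.1 + d.1 < m ∧ 0 ≤ c.2 + d.2 ∧ c.2 + d.2 < n) →
      pvGetM matrix (c.1 + d.1) (c.2 + d.2) < h → pvOK matrix m n h (c.1 + d.1, c.2 + d.2) :=
    fun d _ hb hm => ⟨hb, hm⟩
  obtain ⟨h1, h2⟩ := pvBFoldInv matrix m n h c pvDirs hmap hok4 acc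
  refine ⟨h1, ?_⟩
  have key : ∀ d0 ∈ pvDirs, ∀ d, (c.1 + d0.1, c.2 + d0.2) = d → pvOK matrix m n h d →
      d ∈ (pvBStep matrix m n h acc c).1 :=
    fun d0 hd0 d heq hok => (heq ▸ h2 d0 hd0) hok
  intro d hd hokd
  simp only [pvNbrsL, List.mem_cons, List.not_mem_nil, or_false] at hd
  rcases hd with rfl | rfl | rfl | rfl
  · exact key (1, 0) (by simp [pvDirs]) _
      (Prod.ext_iff.mpr ⟨show c.1 + 1 = c.1 + 1 from rfl, show c.2 + 0 = c.2 by omega⟩) hokd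
  · exact key (0, 1) (by simp [pvDirs]) _
      (Prod.ext_iff.mpr ⟨show c.1 + 0 = c.1 by omega, show c.2 + 1 = c.2 + 1 from rfl⟩) hokd
  · exact key (-1, 0) (by simp [pvDirs]) _
      (Prod.ext_iff.mpr ⟨show c.1 + -1 = c.1 - 1 by omega, show c.2 + 0 = c.2 by omega⟩) hokd
  · exact key (0, -1) (by simp [pvDirs]) _
      (Prod.ext_iff.mpr ⟨show c.1 + 0 = c.1 by omega, show c.2 + -1 = c.2 - 1 by omega⟩) hokd

-- full invariant of one frontier pass
theorem pvBStep_inv (matrix : List (List Int)) (m n h : Int)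
    (fr : List (Int × Int)) (acc : List (Int × Int) × List (Int × Int)) :
    (∀ e, e ∈ (fr.foldl (pvBStep matrix m n h) acc).1 →
      e ∈ acc.1 ∨ (e ∈ (fr.foldl (pvBStep matrix m n h) acc).2 ∧ pvOK matrix m n h e ∧
        ∃ cf ∈ fr, e ∈ pvNbrsL cf)) ∧
    (∀ c ∈ fr, ∀ d ∈ pvNbrsL c, pvOK matrix m n h d →
      d ∈ (fr.foldl (pvBStep matrix m n h) acc).1) := by
  induction fr generalizing acc with
  | nil => exact ⟨fun e he => Or.inl he, fun c hc => absurd hc (List.not_mem_nil)⟩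
  | cons c fr ih =>
    rw [List.foldl_cons]
    obtain ⟨ih1, ih2⟩ := ih (pvBStep matrix m n h acc c)
    obtain ⟨hc1, hc2⟩ := pvBCell_inv matrix m n h c acc
    obtain ⟨ht1, ht2, _⟩ := pvBStep_term matrix m n h fr (pvBStep matrix m n h acc c)
    refine ⟨?_, ?_⟩
    · intro e he
      rcases ih1 e he with he1 | ⟨hin, hok, cf, hcf, hnb⟩
      · rcases hc1 e he1 with hold | ⟨hin, hok, hnb⟩
        · exact Or.inl hold
        · exact Or.inr ⟨ht2 e hin, hok, c, List.mem_cons_self, hnb⟩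
      · exact Or.inr ⟨hin, hok, cf, List.mem_cons_of_mem c hcf, hnb⟩
    · intro c' hc' d hd hokd
      rcases List.mem_cons.mp hc' with rfl | hc''
      · exact ht1 d (hc2 d hd hokd)
      · exact ih2 c' hc'' d hd hokd

def pvBInv (matrix : List (List Int)) (m n h : Int) (s : Int × Int)
    (reach frontier : List (Int × Int)) : Prop :=
  s ∈ reach ∧ (∀ e ∈ frontier, e ∈ reach) ∧
  (∀ e ∈ reach, pvRA matrix m n h [] s e) ∧
  (∀ c ∈ reach, c ∉ frontier → ∀ d ∈ pvNbrsL c, pvOK matrix m n h d → d ∈ reach)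

theorem pvBLoop_closed_iff (matrix : List (List Int)) (m n h : Int) (s : Int × Int)
    (reach : List (Int × Int))
    (hinv : pvBInv matrix m n h s reach []) (t : Int × Int) :
    t ∈ reach ↔ pvRA matrix m n h [] s t := by
    obtain ⟨hs, _, hsound, hcl⟩ := hinv
    constructor
    · exact fun ht => hsound t ht
    · intro hra
      exact pvRA_closed matrix m n h reach
        (fun c hc d hd hok => hcl c hc (List.not_mem_nil) d hd hok) s t hra hs
theorem pvBLoop_iff (matrix : List (List Int)) (m n h : Int) (s : Int × Int) (fuel : Nat)
    (reach frontier : List (Int × Int))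
    (hf : 2 * pvU m n reach + (if frontier.isEmpty then 0 else 1) < fuel)
    (hinv : pvBInv matrix m n h s reach frontier) (t : Int × Int) :
    t ∈ pvBLoop matrix m n h fuel reach frontier ↔ pvRA matrix m n h [] s t := by
  induction fuel generalizing reach frontier with
  | zero => exact absurd hf (Nat.not_lt_zero _)
  | succ f ih =>
    match frontier with
    | [] =>
      rw [show pvBLoop matrix m n h (f + 1) reach [] = reach from by simp [pvBLoop]]
      exact pvBLoop_closed_iff matrix m n h s reach hinv t
    | c :: fr =>
      have hdec := pvBLoop_dec matrix m n h reach c fr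
      have hone : (if (c :: fr).isEmpty = true then 0 else 1) = 1 := rfl
      rw [show pvBLoop matrix m n h (f + 1) reach (c :: fr) =
          pvBLoop matrix m n h f ((c :: fr).foldl (pvBStep matrix m n h) (reach, [])).1
            ((c :: fr).foldl (pvBStep matrix m n h) (reach, [])).2 from by
        simp [pvBLoop]]
      refine ih _ _ (by omega) ?_
      obtain ⟨hs, hfr, hsound, hcl⟩ := hinv
      obtain ⟨ht1, _, ht3⟩ := pvBStep_term matrix m n h (c :: fr) (reach, [])
      obtain ⟨hi1, hi2⟩ := pvBStep_inv matrix m n h (c :: fr) (reach, [])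
      refine ⟨ht1 s hs, ?_, ?_, ?_⟩
      · intro e he
        rcases ht3 e he with habs | ⟨hin, _, _⟩
        · cases habs
        · exact hin
      · intro e he
        rcases hi1 e he with he1 | ⟨_, hok, cf, hcf, hnb⟩
        · exact hsound e he1
        · exact pvRA_snoc matrix m n h [] s cf e (hsound cf (hfr cf hcf)) hnb hok rfl
      · intro c' hc' hnfr d hd hokd
        rcases hi1 c' hc' with hc1 | ⟨hin, _, _⟩
        · by_cases hcfr : c' ∈ c :: fr
          · exact hi2 c' hcfr d hd hokd
          · exact ht1 d (hcl c' hc1 hcfr d hd hokd)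
        · exact absurd hin hnfr

-- ===== VERDICT (by name: the statement is the Claim_ definition above) =====
theorem dfs_spec : Claim_equal_dfs := by
  intro matrix x y tx ty _ _
  simp only [Spec_dfs, dfs, dfs_alt]
  rw [Bool.eq_iff_iff]
  have hA := pvALoop_iff matrix (matrix.length : Int) ((matrix.headD []).length : Int)
    (pvGetM matrix x y) tx ty
    (pvPhi (matrix.length : Int) ((matrix.headD []).length : Int) [] [(x, y)] + 1) [] [(x, y)]
    (Nat.lt_succ_self _)
  have hSR : pvSR matrix (matrix.length : Int) ((matrix.headD []).length : Int)
      (pvGetM matrix x y) [] [(x, y)] (tx, ty) ↔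
      pvRA matrix (matrix.length : Int) ((matrix.headD []).length : Int)
        (pvGetM matrix x y) [] (x, y) (tx, ty) := by
    simp [pvSR]
  have hBinv : pvBInv matrix (matrix.length : Int) ((matrix.headD []).length : Int)
      (pvGetM matrix x y) (x, y) (PySem.Set.ofList [(x, y)]) [(x, y)] := by
    refine ⟨(PySem.Set.mem_ofList _ _).mpr (by simp), ?_, ?_, ?_⟩
    · intro e he
      rcases List.mem_singleton.mp he with rfl
      exact (PySem.Set.mem_ofList _ _).mpr (by simp)
    · intro e he
      rcases List.mem_singleton.mp ((PySem.Set.mem_ofList _ _).mp he) with rfl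
      exact .refl _
    · intro c hc hnfr
      rcases List.mem_singleton.mp ((PySem.Set.mem_ofList _ _).mp hc) with rfl
      exact absurd (List.mem_singleton_self _) hnfr
  have hB := pvBLoop_iff matrix (matrix.length : Int) ((matrix.headD []).length : Int)
    (pvGetM matrix x y) (x, y)
    (2 * pvU (matrix.length : Int) ((matrix.headD []).length : Int)
      (PySem.Set.ofList [(x, y)]) + 2)
    (PySem.Set.ofList [(x, y)]) [(x, y)]
    (by have hone : (if ([(x, y)] : List (Int × Int)).isEmpty = true then 0 else 1) = 1 := rfl
        omega)
    hBinv (tx, ty)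
  rw [hA, hSR, ← hB]
  rw [PySem.Set.contains_iff]
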